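-- pv_equiv track=rewrite | github.com/harish-somaghatta/metal-classification-debye-prediction | data_preprocessing/ordinal_encod.py | encode_space_group
-- ===== SOURCE A (Python) =====
-- def encode_space_group(list_space_group):
--
--     """
--     Get the list of space group values and return label encoded space group values.
--
--     Arguments:
--     space_group_list (list) : List of space group values.
--
--     Returns:
--     encode_space_group (list) : List of encoded space group values.
--
--     """
--     space_grp_dict = {} # Initialize a dictionary to store sorted space group values and their indices.
--     encode_space_group = [] # Initialize a list to store encoded space group values.
--     space_grp_set = set() # Initialize a set to store unique space group values.
--
--     for space_grp in list_space_group: # Iterate over space group list values.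
--         space_grp_set.add(int(space_grp)) # Add each space group value to the set.
--     unq_space_grp_list = list(space_grp_set) # Convert list to set to iterate.
--     sort_space_grp = sorted(unq_space_grp_list) # Sort the space group values
--     # Iterate over sorted unique space group values .
--     for i, space_grp in enumerate(sort_space_grp):
--         space_grp_dict[space_grp] = i # Append space group values against their index.
--
--     # Iterate over list of space group values and append encoded space group values
--     for space_group_val in list_space_group:
--         encoded_space_group_val = space_grp_dict[int(space_group_val)]
--         encode_space_group.append(str(encoded_space_group_val))
--
--     # Return encoded space group values
--     return encode_space_group
-- ===== SOURCE B (Python) =====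
-- def encode_space_group(list_space_group):
--     """Sort (value, index) records once, then a single positional sweep assigns a
--     running dense rank (incremented when the value changes) into a pre-sized output."""
--     n = len(list_space_group)
--     pairs = sorted((int(v), i) for i, v in enumerate(list_space_group))
--     out = [""] * n
--     rank = -1
--     prev = None
--     for v, i in pairs:
--         if v != prev:
--             rank += 1
--             prev = v
--         out[i] = str(rank)
--     return out
-- ===== Notes on version B (the rewrite author's own statement) =====
-- stated objective: alternative
-- what changed: Replaces A's value-to-rank dictionary and per-element lookups with a sort of (value, original index) records followed by one positional sweep that carries a running dense rank (incremented on value change) and writes str(rank) into a pre-sized output at each record's original index; no set of unique values and no dictionary are built.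
import Mathlib
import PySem

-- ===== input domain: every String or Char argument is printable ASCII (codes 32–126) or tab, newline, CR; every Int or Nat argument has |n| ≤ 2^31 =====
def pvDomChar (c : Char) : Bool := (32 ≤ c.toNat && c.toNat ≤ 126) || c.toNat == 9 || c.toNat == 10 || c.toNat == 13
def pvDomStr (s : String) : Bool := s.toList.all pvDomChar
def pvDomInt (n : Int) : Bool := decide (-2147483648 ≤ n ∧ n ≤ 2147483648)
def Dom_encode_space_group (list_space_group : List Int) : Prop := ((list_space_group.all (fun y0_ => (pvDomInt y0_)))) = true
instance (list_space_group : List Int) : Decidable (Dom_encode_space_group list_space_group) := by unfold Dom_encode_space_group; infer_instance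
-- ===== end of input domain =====

-- B replaces A's value→rank dictionary and per-element lookups with a sort of
-- (value, original index) records and one positional sweep that writes a running
-- dense rank into a pre-sized output (a different decomposition of the same cost).

-- ===== PORT A =====
def encode_space_group (list_space_group : List Int) : List String :=
  -- space_grp_set: for space_grp in list_space_group: space_grp_set.add(int(space_grp))
  let space_grp_set := list_space_group.foldl (fun s v => PySem.Set.add s v) PySem.Set.empty
  -- unq_space_grp_list = list(space_grp_set); sort_space_grp = sorted(unq_space_grp_list)
  let sort_space_grp := PySem.List.sorted space_grp_set (fun x => x) false
  -- for i, space_grp in enumerate(sort_space_grp): space_grp_dict[space_grp] = i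
  let space_grp_dict : PySem.Dict Int Int :=
    (PySem.List.enumerate sort_space_grp).foldl (fun d p => d.insert p.2 p.1) PySem.Dict.empty
  -- for space_group_val in list_space_group: append str(dict[int(space_group_val)])
  -- (the key is always present, so the Python lookup never raises; getD's default is never used)
  list_space_group.foldl
    (fun acc v => acc ++ [PySem.Int.toStr (space_grp_dict.getD v 0)]) []

-- ===== PORT B =====
def encode_space_group_alt (list_space_group : List Int) : List String :=
  -- n = len(list_space_group)
  let n : Int := (list_space_group.length : Int)
  -- pairs = sorted((int(v), i) for i, v in enumerate(list_space_group))   (tuple sort = lex)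
  let pairs := PySem.List.sorted2
    ((PySem.List.enumerate list_space_group 0).map (fun p => (p.2, p.1))) Prod.fst Prod.snd false
  -- out = [""] * n;  rank = -1;  prev = None
  -- for v, i in pairs: if v != prev: rank += 1; prev = v;  out[i] = str(rank)
  let res := pairs.foldl
    (fun st p =>
      if some p.1 ≠ st.2.2 then
        (PySem.List.pySetD st.1 p.2 (PySem.Int.toStr (st.2.1 + 1)), st.2.1 + 1, some p.1)
      else
        (PySem.List.pySetD st.1 p.2 (PySem.Int.toStr st.2.1), st.2.1, st.2.2))
    (PySem.List.pyRepeat [""] n, (-1 : Int), (none : Option Int))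
  res.1

-- ===== PRECONDITION & SPEC =====
def Spec_encode_space_group (list_space_group : List Int) (out : List String) : Prop := out = encode_space_group_alt list_space_group
instance (list_space_group : List Int) (out : List String) : Decidable (Spec_encode_space_group list_space_group out) := by unfold Spec_encode_space_group; infer_instance

-- ===== CLAIM (what is proved, stated in full; the proofs are below) =====
def Claim_equal_encode_space_group : Prop := ∀ (list_space_group : List Int), Dom_encode_space_group list_space_group → Spec_encode_space_group list_space_group (encode_space_group list_space_group)

-- ===== LEMMAS AND PROOFS =====

-- A's dict loop: looking up v in the dict built from enumerate(l, s) gives s + index of v in l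
theorem getD_enum_fold_of_not_mem (l : List Int) (s : Int) (d : PySem.Dict Int Int)
    (v : Int) (hv : v ∉ l) :
    (((PySem.List.enumerate l s).foldl (fun d p => d.insert p.2 p.1) d).getD v 0) = d.getD v 0 := by
  induction l generalizing s d with
  | nil => simp [PySem.List.enumerate_nil]
  | cons x t ih =>
    simp only [PySem.List.enumerate_cons, List.foldl_cons]
    rw [ih _ _ (by simp_all)]
    exact PySem.Dict.getD_insert_of_ne _ _ _ (by simp_all)

theorem getD_enum_fold (l : List Int) (s : Int) (d : PySem.Dict Int Int)
    (v : Int) (hnd : l.Nodup) (hv : v ∈ l) :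
    (((PySem.List.enumerate l s).foldl (fun d p => d.insert p.2 p.1) d).getD v 0) = s + (l.idxOf v : Int) := by
  induction l generalizing s d with
  | nil => simp at hv
  | cons x t ih =>
    simp only [PySem.List.enumerate_cons, List.foldl_cons]
    by_cases hx : v = x
    · subst hx
      rw [getD_enum_fold_of_not_mem _ _ _ _ (by simp_all)]
      simp [PySem.Dict.getD_insert_self]
    · have hvt : v ∈ t := by simp_all
      rw [ih _ _ (by simp_all) hvt]
      rw [List.idxOf_cons_ne _ (by exact fun h => hx h.symm)]
      push_cast
      ring

-- in a strictly increasing list, the index of a member is the number of smaller elements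
theorem idxOf_eq_countP_lt (l : List Int) (hp : l.Pairwise (· < ·)) (v : Int) (hv : v ∈ l) :
    l.idxOf v = l.countP (fun x => decide (x < v)) := by
  induction l with
  | nil => simp at hv
  | cons x t ih =>
    have hxt : ∀ y ∈ t, x < y := (List.pairwise_cons.1 hp).1
    by_cases hx : v = x
    · subst hx
      have h0 : t.countP (fun x => decide (x < v)) = 0 := by
        rw [List.countP_eq_zero]
        intro y hy
        have := hxt y hy
        simp only [decide_eq_true_eq]
        omega
      simp [h0]
    · have hvt : v ∈ t := by simp_all
      have hxv : x < v := hxt v hvt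
      rw [List.idxOf_cons_ne _ (fun h => hx h.symm), ih (List.pairwise_cons.1 hp).2 hvt]
      simp [hxv, Nat.add_comm]

-- in a duplicate-free list, counting ≤ v is one more than counting < v when v is a member
theorem countP_le_eq_countP_lt_succ (U : List Int) (hU : U.Nodup) (v : Int) (hv : v ∈ U) :
    U.countP (fun u => decide (u ≤ v)) = U.countP (fun u => decide (u < v)) + 1 := by
  induction U with
  | nil => simp at hv
  | cons u T ih =>
    rcases List.nodup_cons.1 hU with ⟨hu, hT⟩
    by_cases h : u = v
    · subst h
      have hc : T.countP (fun x => decide (x ≤ u)) = T.countP (fun x => decide (x < u)) := by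
        apply List.countP_congr
        intro x hx
        have : x ≠ u := fun he => hu (he ▸ hx)
        simp only [decide_eq_true_eq]
        omega
      simp [hc]
    · have hvT : v ∈ T := (List.mem_cons.1 hv).resolve_left (fun he => h he.symm)
      have hd : decide (u ≤ v) = decide (u < v) := by
        rw [decide_eq_decide]
        omega
      simp only [List.countP_cons, hd, ih hT hvT]
      omega

-- the lexicographic insertion of Python's tuple sort keeps the list sorted by first component
theorem insertBy_lex_fst_pairwise (x : Int × Int) (ys : List (Int × Int))
    (h : ys.Pairwise (fun a b => a.1 ≤ b.1)) :
    (PySem.List.insertBy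
        (fun a b => decide (a.1 < b.1) || !decide (b.1 < a.1) && decide (a.2 < b.2)) x ys).Pairwise
      (fun a b => a.1 ≤ b.1) := by
  induction ys with
  | nil => simp [PySem.List.insertBy]
  | cons y ys ih =>
    rw [PySem.List.insertBy]
    by_cases hb : (decide (x.1 < y.1) || !decide (y.1 < x.1) && decide (x.2 < y.2)) = true
    · rw [if_pos hb]
      have hx1 : x.1 ≤ y.1 := by
        simp only [Bool.or_eq_true, Bool.and_eq_true, Bool.not_eq_eq_eq_not, Bool.not_true,
          decide_eq_true_eq, decide_eq_false_iff_not] at hb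
        omega
      refine List.pairwise_cons.2 ⟨?_, h⟩
      intro z hz
      rcases List.mem_cons.1 hz with rfl | hzys
      · exact hx1
      · exact le_trans hx1 ((List.pairwise_cons.1 h).1 z hzys)
    · rw [if_neg hb]
      have hy1 : y.1 ≤ x.1 := by
        simp only [Bool.or_eq_true, Bool.and_eq_true, Bool.not_eq_eq_eq_not, Bool.not_true,
          decide_eq_true_eq, decide_eq_false_iff_not] at hb
        omega
      refine List.pairwise_cons.2 ⟨?_, ih (List.pairwise_cons.1 h).2⟩
      intro z hz
      rcases (PySem.List.mem_insertBy _ _ _ _).1 hz with rfl | hzys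
      · exact hy1
      · exact (List.pairwise_cons.1 h).1 z hzys

theorem foldl_insertBy_lex_fst_pairwise (zs : List (Int × Int)) :
    ∀ acc : List (Int × Int), acc.Pairwise (fun a b => a.1 ≤ b.1) →
      (zs.foldl
        (fun acc x =>
          PySem.List.insertBy
            (fun a b => decide (a.1 < b.1) || !decide (b.1 < a.1) && decide (a.2 < b.2)) x acc)
        acc).Pairwise (fun a b => a.1 ≤ b.1) := by
  induction zs with
  | nil => exact fun acc h => h
  | cons z t ih =>
    intro acc h
    exact ih _ (insertBy_lex_fst_pairwise z acc h)

theorem sorted2_fst_pairwise (zs : List (Int × Int)) :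
    (PySem.List.sorted2 zs Prod.fst Prod.snd false).Pairwise (fun a b => a.1 ≤ b.1) :=
  foldl_insertBy_lex_fst_pairwise zs [] (by simp)

-- the assignment stream of B's sweep: (index, str(rank)) records in sweep order
def asn : Int → Option Int → List (Int × Int) → List (Int × String)
  | _, _, [] => []
  | r, pv, p :: t =>
    if some p.1 ≠ pv then (p.2, PySem.Int.toStr (r + 1)) :: asn (r + 1) (some p.1) t
    else (p.2, PySem.Int.toStr r) :: asn r pv t

-- B's loop = play the assignment stream onto the output list
theorem loop_out_eq (ps : List (Int × Int)) (out : List String) (r : Int) (pv : Option Int) :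
    (ps.foldl
      (fun st p =>
        if some p.1 ≠ st.2.2 then
          (PySem.List.pySetD st.1 p.2 (PySem.Int.toStr (st.2.1 + 1)), st.2.1 + 1, some p.1)
        else
          (PySem.List.pySetD st.1 p.2 (PySem.Int.toStr st.2.1), st.2.1, st.2.2))
      (out, r, pv)).1
    = (asn r pv ps).foldl (fun o a => PySem.List.pySetD o a.1 a.2) out := by
  induction ps generalizing out r pv with
  | nil => rfl
  | cons p t ih =>
    simp only [List.foldl_cons, asn]
    by_cases h : some p.1 = pv
    · rw [if_neg (fun hc => hc h), if_neg (fun hc => hc h), List.foldl_cons, ih]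
    · rw [if_pos h, if_pos h, List.foldl_cons, ih]

-- sweep invariant: on a value-sorted stream whose values cover U beyond prev, the rank
-- written for a pair p is the number of distinct values smaller than p.1
theorem asn_some (U : List Int) (hU : U.Nodup) :
    ∀ (ps : List (Int × Int)) (m r : Int),
      ps.Pairwise (fun a b => a.1 ≤ b.1) →
      (∀ p ∈ ps, m ≤ p.1) →
      (∀ u ∈ U, u ≤ m ∨ ∃ p ∈ ps, u = p.1) →
      (∀ p ∈ ps, p.1 ∈ U) →
      r = ((U.countP (fun u => decide (u ≤ m)) : Nat) : Int) - 1 →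
      asn r (some m) ps
        = ps.map (fun p => (p.2, PySem.Int.toStr ((U.countP (fun u => decide (u < p.1)) : Nat) : Int))) := by
  intro ps
  induction ps with
  | nil => intros; rfl
  | cons p t ih =>
    intro m r hs hL hcov hV hr
    have hmv : m ≤ p.1 := hL p (by simp)
    have hvU : p.1 ∈ U := hV p (by simp)
    have htail_ge : ∀ q ∈ t, p.1 ≤ q.1 := (List.pairwise_cons.1 hs).1
    have hcov' : ∀ u ∈ U, u ≤ p.1 → (u ≤ m ∨ u = p.1) := by
      intro u hu huv
      rcases hcov u hu with hum | ⟨q, hq, rfl⟩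
      · exact Or.inl hum
      · rcases List.mem_cons.1 hq with rfl | hqt
        · exact Or.inr rfl
        · exact Or.inr (le_antisymm huv (htail_ge q hqt))
    have hsucc : U.countP (fun u => decide (u ≤ p.1)) = U.countP (fun u => decide (u < p.1)) + 1 :=
      countP_le_eq_countP_lt_succ U hU _ hvU
    by_cases hv : p.1 = m
    · -- same value as prev: rank unchanged
      have hcount : U.countP (fun u => decide (u ≤ m)) = U.countP (fun u => decide (u < p.1)) + 1 := by
        rw [← hv]
        exact hsucc
      simp only [asn, List.map_cons]
      rw [if_neg (not_not_intro (congrArg some hv))]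
      congr 1
      · have hrv : r = ((U.countP (fun u => decide (u < p.1)) : Nat) : Int) := by omega
        rw [hrv]
      · apply ih m r (List.pairwise_cons.1 hs).2
        · intro q hq
          exact hv ▸ htail_ge q hq
        · intro u hu
          rcases hcov u hu with hum | ⟨q, hq, rfl⟩
          · exact Or.inl hum
          · rcases List.mem_cons.1 hq with rfl | hqt
            · exact Or.inl (le_of_eq hv)
            · exact Or.inr ⟨q, hqt, rfl⟩
        · exact fun q hq => hV q (List.mem_cons_of_mem _ hq)
        · exact hr
    · -- new value: rank increments
      have hmlt : m < p.1 := lt_of_le_of_ne hmv (fun e => hv e.symm)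
      have hlt_eq : U.countP (fun u => decide (u < p.1)) = U.countP (fun u => decide (u ≤ m)) := by
        apply List.countP_congr
        intro u hu
        simp only [decide_eq_true_eq]
        constructor
        · intro hult
          rcases hcov' u hu (le_of_lt hult) with hum | rfl
          · exact hum
          · omega
        · intro hum
          omega
      simp only [asn, List.map_cons]
      rw [if_pos (show some p.1 ≠ some m from fun hc => hv (Option.some.inj hc))]
      congr 1
      · have hrv : r + 1 = ((U.countP (fun u => decide (u < p.1)) : Nat) : Int) := by omega
        rw [hrv]
      · apply ih p.1 (r + 1) (List.pairwise_cons.1 hs).2 htail_ge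
        · intro u hu
          rcases hcov u hu with hum | ⟨q, hq, rfl⟩
          · exact Or.inl (by omega)
          · rcases List.mem_cons.1 hq with rfl | hqt
            · exact Or.inl le_rfl
            · exact Or.inr ⟨q, hqt, rfl⟩
        · exact fun q hq => hV q (List.mem_cons_of_mem _ hq)
        · omega

theorem asn_none (U : List Int) (hU : U.Nodup) (ps : List (Int × Int))
    (hs : ps.Pairwise (fun a b => a.1 ≤ b.1))
    (hcov : ∀ u ∈ U, ∃ p ∈ ps, u = p.1)
    (hV : ∀ p ∈ ps, p.1 ∈ U) :
    asn (-1) none ps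
      = ps.map (fun p => (p.2, PySem.Int.toStr ((U.countP (fun u => decide (u < p.1)) : Nat) : Int))) := by
  cases ps with
  | nil => rfl
  | cons p t =>
    have htail_ge : ∀ q ∈ t, p.1 ≤ q.1 := (List.pairwise_cons.1 hs).1
    have hzero : U.countP (fun u => decide (u < p.1)) = 0 := by
      rw [List.countP_eq_zero]
      intro u hu
      rcases hcov u hu with ⟨q, hq, rfl⟩
      simp only [decide_eq_true_eq]
      rcases List.mem_cons.1 hq with rfl | hqt
      · omega
      · have := htail_ge q hqt
        omega
    have hvU : p.1 ∈ U := hV p (by simp)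
    have hsucc : U.countP (fun u => decide (u ≤ p.1)) = U.countP (fun u => decide (u < p.1)) + 1 :=
      countP_le_eq_countP_lt_succ U hU _ hvU
    simp only [asn, List.map_cons]
    rw [if_pos (Option.some_ne_none p.1)]
    congr 1
    · have hrv : (-1 : Int) + 1 = ((U.countP (fun u => decide (u < p.1)) : Nat) : Int) := by omega
      rw [hrv]
    · apply asn_some U hU t p.1 0 (List.pairwise_cons.1 hs).2 htail_ge
      · intro u hu
        rcases hcov u hu with ⟨q, hq, rfl⟩
        rcases List.mem_cons.1 hq with rfl | hqt
        · exact Or.inl le_rfl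
        · exact Or.inr ⟨q, hqt, rfl⟩
      · exact fun q hq => hV q (List.mem_cons_of_mem _ hq)
      · omega

theorem length_foldl_pySetD (as : List (Int × String)) (out : List String) :
    (as.foldl (fun o a => PySem.List.pySetD o a.1 a.2) out).length = out.length := by
  induction as generalizing out with
  | nil => rfl
  | cons a t ih => simp [List.foldl_cons, ih, PySem.List.length_pySetD]

theorem foldl_pySetD_getElem?_of_not (as : List (Int × String)) (out : List String) (j : Nat)
    (h : ∀ a ∈ as, 0 ≤ a.1 ∧ a.1 ≠ (j : Int)) :
    (as.foldl (fun o a => PySem.List.pySetD o a.1 a.2) out)[j]? = out[j]? := by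
  induction as generalizing out with
  | nil => rfl
  | cons a t ih =>
    rcases h a (by simp) with ⟨h0, hne⟩
    rw [List.foldl_cons, ih _ (fun x hx => h x (by simp [hx])),
        PySem.List.pySetD_of_nonneg _ _ h0,
        List.getElem?_set_ne (by omega)]

theorem foldl_pySetD_getElem? (as : List (Int × String)) (out : List String) (j : Nat)
    (a : Int × String)
    (hnd : as.Pairwise (fun x y => x.1 ≠ y.1)) (hpos : ∀ x ∈ as, 0 ≤ x.1)
    (ha : a ∈ as) (haj : a.1 = (j : Int)) (hj : j < out.length) :
    (as.foldl (fun o x => PySem.List.pySetD o x.1 x.2) out)[j]? = some a.2 := by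
  induction as generalizing out with
  | nil => simp at ha
  | cons b t ih =>
    rcases List.pairwise_cons.1 hnd with ⟨hbt, hTnd⟩
    rcases List.mem_cons.1 ha with rfl | hat
    · rw [List.foldl_cons,
          foldl_pySetD_getElem?_of_not _ _ _
            (fun x hx => ⟨hpos x (by simp [hx]), fun he => hbt x hx (haj.trans he.symm)⟩),
          PySem.List.pySetD_of_nonneg _ _ (hpos a (by simp)), haj]
      simp only [Int.toNat_natCast]
      exact List.getElem?_set_self hj
    · rw [List.foldl_cons]
      exact ih _ hTnd (fun x hx => hpos x (by simp [hx])) hat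
        (by rw [PySem.List.length_pySetD]; omega)

-- ===== VERDICT (by name: the statement is the Claim_ definition above) =====
theorem encode_space_group_spec : Claim_equal_encode_space_group := by
  intro xs _
  unfold Spec_encode_space_group encode_space_group encode_space_group_alt
  rw [PySem.List.foldl_append_singleton_eq_map]
  have hset : xs.foldl (fun s v => PySem.Set.add s v) PySem.Set.empty = PySem.Set.ofList xs :=
    (PySem.Set.ofList_eq_foldl xs).symm
  rw [hset]
  set U := PySem.List.sorted (PySem.Set.ofList xs) (fun x => x) false with hUdef
  have hpair : U.Pairwise (· < ·) := PySem.List.sorted_ofList_pairwise_lt xs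
  have hUnd : U.Nodup := hpair.nodup
  set zs := (PySem.List.enumerate xs 0).map (fun p => (p.2, p.1)) with hzsdef
  set ps := PySem.List.sorted2 zs Prod.fst Prod.snd false with hpsdef
  have hps_perm : ps.Perm zs := PySem.List.sorted2_perm zs _ _ false
  have hs : ps.Pairwise (fun a b => a.1 ≤ b.1) := sorted2_fst_pairwise zs
  -- membership characterisations
  have hmemzs : ∀ (k : Nat), ∀ hk : k < xs.length, ((xs[k], (k : Int)) : Int × Int) ∈ zs := by
    intro k hk
    rw [hzsdef, List.mem_map]
    refine ⟨((k : Int), xs[k]), ?_, rfl⟩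
    rw [PySem.List.mem_enumerate_iff]
    exact ⟨k, hk, by simp⟩
  have hchar : ∀ p ∈ ps, ∃ (k : Nat) (hk : k < xs.length), p = ((xs[k], (k : Int)) : Int × Int) := by
    intro p hp
    have hpz : p ∈ zs := hps_perm.mem_iff.1 hp
    rw [hzsdef, List.mem_map] at hpz
    rcases hpz with ⟨q, hq, rfl⟩
    rw [PySem.List.mem_enumerate_iff] at hq
    rcases hq with ⟨k, hk, rfl⟩
    exact ⟨k, hk, by simp⟩
  have hmemps : ∀ (k : Nat), ∀ hk : k < xs.length, ((xs[k], (k : Int)) : Int × Int) ∈ ps :=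
    fun k hk => hps_perm.mem_iff.2 (hmemzs k hk)
  -- run the sweep: B's loop body is the assignment stream of asn
  rw [loop_out_eq, PySem.List.pyRepeat_singleton, Int.toNat_natCast,
      asn_none U hUnd ps hs
        (by
          intro u hu
          have hux : u ∈ xs := by
            rw [hUdef, PySem.List.mem_sorted, PySem.Set.mem_ofList] at hu
            exact hu
          rcases List.mem_iff_getElem.1 hux with ⟨k, hk, rfl⟩
          exact ⟨(xs[k], (k : Int)), hmemps k hk, rfl⟩)
        (by
          intro p hp
          rcases hchar p hp with ⟨k, hk, rfl⟩
          rw [hUdef, PySem.List.mem_sorted, PySem.Set.mem_ofList]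
          exact List.getElem_mem hk)]
  -- A's dict lookup is the same dense rank
  have hA : (xs.map fun v =>
        PySem.Int.toStr
          (((PySem.List.enumerate U).foldl (fun d p => d.insert p.2 p.1) PySem.Dict.empty).getD v 0))
      = xs.map (fun v => PySem.Int.toStr ((U.countP (fun u => decide (u < v)) : Nat) : Int)) := by
    apply List.map_congr_left
    intro v hv
    have hvU : v ∈ U := by
      rw [hUdef, PySem.List.mem_sorted, PySem.Set.mem_ofList]
      exact hv
    rw [getD_enum_fold U 0 _ v hUnd hvU, idxOf_eq_countP_lt U hpair v hvU, zero_add]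
  rw [List.nil_append, hA]
  -- distinct indices in the assignment stream
  have hz2 : zs.Pairwise (fun a b => a.2 < b.2) :=
    List.pairwise_map.mpr (PySem.List.pairwise_lt_enumerate xs 0)
  have hzn : (zs.map Prod.snd).Nodup :=
    List.pairwise_map.mpr (hz2.imp (fun h => ne_of_lt h))
  have hpn : (ps.map Prod.snd).Nodup := ((hps_perm.symm).map Prod.snd).nodup hzn
  have hps2 : ps.Pairwise (fun a b => a.2 ≠ b.2) := List.pairwise_map.mp hpn
  -- compare element by element
  apply List.ext_getElem?
  intro j
  by_cases hj : j < xs.length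
  · have hB := foldl_pySetD_getElem?
      (List.map (fun p => (p.2, PySem.Int.toStr ((U.countP (fun u => decide (u < p.1)) : Nat) : Int))) ps)
      (List.replicate xs.length "") j
      ((j : Int), PySem.Int.toStr ((U.countP (fun u => decide (u < xs[j])) : Nat) : Int))
      (List.pairwise_map.mpr hps2)
      (by
        intro x hx
        rcases List.mem_map.1 hx with ⟨p, hp, rfl⟩
        rcases hchar p hp with ⟨k, hk, rfl⟩
        simp)
      (List.mem_map_of_mem (hmemps j hj))
      rfl
      (by rw [List.length_replicate]; exact hj)
    rw [hB, List.getElem?_map, List.getElem?_eq_getElem hj, Option.map_some]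
  · rw [List.getElem?_eq_none, List.getElem?_eq_none]
    · rw [length_foldl_pySetD, List.length_replicate]; omega
    · rw [List.length_map]; omega
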